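-- pv_equiv track=rewrite | github.com/Opsimathy/IT5003 | Finals/IT5003 23S1/IT5003 23S1 Final Code.py | marketingPromotion
-- ===== SOURCE A (Python) =====
-- from typing import List
--
-- def marketingPromotion(receipts: List[List[int]]) -> int:
--     from heapq import heappush, heappop
--     mh, Mh, f, ans = [], [], {}, 0
--     for d in receipts:
--         for x in d:
--             heappush(mh, x)
--             heappush(Mh, -x)
--             f[x] = f.get(x, 0) + 1
--         while f.get(-Mh[0], 0) == 0:
--             heappop(Mh)
--         M = -heappop(Mh)
--         f[M] -= 1
--         while f.get(mh[0], 0) == 0: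
--             heappop(mh)
--         m = heappop(mh)
--         f[m] -= 1
--         ans += M - m
--     return ans
-- ===== SOURCE B (Python) =====
-- from typing import List
--
-- def marketingPromotion(receipts: List[List[int]]) -> int:
--     s, ans = [], 0
--     for d in receipts:
--         s += d
--         s.sort()
--         M = s.pop()
--         m = s.pop(0)
--         ans += M - m
--     return ans
-- ===== Notes on version B (the rewrite author's own statement) =====
-- stated objective: simpler
-- what changed: Replaces the two lazy-deleted heaps plus a frequency map by one plain list kept across days: each day the day's values are appended and the list re-sorted (timsort merges the two runs), then the day's max and min are popped from the two ends, so the heaps, the counter and the lazy-deletion loops disappear.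
import Mathlib
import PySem

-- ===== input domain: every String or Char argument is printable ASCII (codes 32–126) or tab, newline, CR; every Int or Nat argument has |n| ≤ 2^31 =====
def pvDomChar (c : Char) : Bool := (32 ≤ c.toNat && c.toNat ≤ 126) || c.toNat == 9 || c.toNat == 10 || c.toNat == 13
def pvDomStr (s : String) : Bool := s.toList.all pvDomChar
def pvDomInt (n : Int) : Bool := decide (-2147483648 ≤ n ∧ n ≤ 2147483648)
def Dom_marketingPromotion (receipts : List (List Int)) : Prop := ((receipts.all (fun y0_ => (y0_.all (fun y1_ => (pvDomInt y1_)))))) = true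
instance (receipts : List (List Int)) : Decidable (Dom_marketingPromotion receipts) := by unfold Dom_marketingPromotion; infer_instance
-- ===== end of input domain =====

-- B replaces A's two lazy-deleted heaps plus frequency map by one sorted list whose ends give
-- each day's max and min (objective: simpler). Equal return value on all inputs where A returns.

-- the value-exact model of heappush on an Int heap kept as a sorted list (for Int elements
-- heapq's observable behaviour — h[0] = min, heappop removes one minimum — is determined by
-- the multiset, so the sorted-list model of the library is exact)
def pvInsort (x : Int) : List Int → List Int
  | [] => [x]
  | y :: t => if x < y then x :: y :: t else y :: pvInsort x t

-- ===== PORT A =====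
-- `while f.get(mh[0], 0) == 0: heappop(mh)` ; none = IndexError on mh[0]
def pvDropStale (f : PySem.Dict Int Int) : List Int → Option (List Int)
  | [] => none
  | x :: t => if f.getD x 0 = 0 then pvDropStale f t else some (x :: t)

-- the same loop on the negated heap: `while f.get(-Mh[0], 0) == 0: heappop(Mh)`
def pvDropStaleNeg (f : PySem.Dict Int Int) : List Int → Option (List Int)
  | [] => none
  | x :: t => if f.getD (-x) 0 = 0 then pvDropStaleNeg f t else some (x :: t)

-- the inner `for x in d` body: heappush(mh, x); heappush(Mh, -x); f[x] = f.get(x, 0) + 1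
def pvPushA (p : List Int × List Int × PySem.Dict Int Int) (x : Int) :
    List Int × List Int × PySem.Dict Int Int :=
  (pvInsort x p.1, pvInsort (-x) p.2.1, p.2.2.insert x (p.2.2.getD x 0 + 1))

-- min side of a day: m = heappop(mh) after the lazy loop; f[m] -= 1; ans += M - m
def pvMinStep (mh MhT : List Int) (f : PySem.Dict Int Int) (M ans : Int) :
    Option (List Int × List Int × PySem.Dict Int Int × Int) :=
  match pvDropStale f mh with
  | none => none
  | some [] => none
  | some (m :: mhT) => some (mhT, MhT, f.insert m (f.getD m 0 - 1), ans + (M - m))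

-- max side of a day: M = -heappop(Mh) after the lazy loop; f[M] -= 1
def pvMaxStep (p : List Int × List Int × PySem.Dict Int Int) (ans : Int) :
    Option (List Int × List Int × PySem.Dict Int Int × Int) :=
  match pvDropStaleNeg p.2.2 p.2.1 with
  | none => none
  | some [] => none
  | some (h :: MhT) => pvMinStep p.1 MhT (p.2.2.insert (-h) (p.2.2.getD (-h) 0 - 1)) (-h) ans

-- one iteration of `for d in receipts`
def pvDayA (st : List Int × List Int × PySem.Dict Int Int × Int) (d : List Int) :
    Option (List Int × List Int × PySem.Dict Int Int × Int) :=
  pvMaxStep (d.foldl pvPushA (st.1, st.2.1, st.2.2.1)) st.2.2.2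

def marketingPromotion (receipts : List (List Int)) : Int :=
  match receipts.foldl (fun o d => o.bind (fun st => pvDayA st d))
      (some ([], [], PySem.Dict.empty, 0)) with
  | none => 0
  | some st => st.2.2.2

-- ===== PORT B =====
-- M = s.pop(); m = s.pop(0); ans += M - m   (none = IndexError on an empty pop)
def pvPopB (s : List Int) (ans : Int) : Option (List Int × Int) :=
  match s.getLast? with
  | none => none
  | some M =>
    match s.dropLast with
    | [] => none
    | m :: rest => some (rest, ans + (M - m))

-- one iteration of `for d in receipts`: s += d; s.sort(); then pop both ends
def pvDayB (st : List Int × Int) (d : List Int) : Option (List Int × Int) :=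
  pvPopB (PySem.List.sorted (st.1 ++ d) (fun x => x) false) st.2

def marketingPromotion_alt (receipts : List (List Int)) : Int :=
  match receipts.foldl (fun o d => o.bind (fun st => pvDayB st d)) (some ([], 0)) with
  | none => 0
  | some st => st.2

-- ===== PRECONDITION & SPEC =====
-- A raises IndexError exactly when some day leaves fewer than two live receipts to pop (each day
-- consumes two); Pre_ is that characterization: after each prefix of days the total number of
-- pushed values covers two pops per day.
def Pre_marketingPromotion (receipts : List (List Int)) : Prop :=
  ∀ i, i < receipts.length → 2 * (i + 1) ≤ ((receipts.take (i + 1)).map List.length).sum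
instance (receipts : List (List Int)) : Decidable (Pre_marketingPromotion receipts) := by
  unfold Pre_marketingPromotion; infer_instance

def pvWitness_marketingPromotion : List (List Int) := [[1, 2], [3, 4]]

def Spec_marketingPromotion (receipts : List (List Int)) (out : Int) : Prop := out = marketingPromotion_alt receipts
instance (receipts : List (List Int)) (out : Int) : Decidable (Spec_marketingPromotion receipts out) := by unfold Spec_marketingPromotion; infer_instance

-- ===== CLAIM (what is proved, stated in full; the proofs are below) =====
def Claim_equal_marketingPromotion : Prop := ∀ (receipts : List (List Int)), Dom_marketingPromotion receipts → Pre_marketingPromotion receipts → Spec_marketingPromotion receipts (marketingPromotion receipts)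

-- ===== LEMMAS AND PROOFS =====

-- the simulation invariant: s is B's sorted list; A's heaps are sorted, its dict counts s
-- exactly, and each heap contains the live multiset (mh the values, Mh their negations)
def pvInv (mh Mh : List Int) (f : PySem.Dict Int Int) (s : List Int) : Prop :=
  mh.Pairwise (· ≤ ·) ∧ Mh.Pairwise (· ≤ ·) ∧ s.Pairwise (· ≤ ·) ∧
  (∀ y : Int, f.getD y 0 = (s.count y : Int)) ∧
  (∀ y : Int, s.count y ≤ mh.count y) ∧
  (∀ y : Int, s.count y ≤ Mh.count (-y))

def pvORel (oa : Option (List Int × List Int × PySem.Dict Int Int × Int))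
    (ob : Option (List Int × Int)) : Prop :=
  match oa, ob with
  | none, none => True
  | some a, some b => pvInv a.1 a.2.1 a.2.2.1 b.1 ∧ a.2.2.2 = b.2
  | _, _ => False

lemma pvInsort_perm (x : Int) (l : List Int) : (pvInsort x l).Perm (x :: l) := by
  induction l with
  | nil => simp [pvInsort]
  | cons y t ih =>
    simp only [pvInsort]
    split
    · exact List.Perm.refl _
    · exact (ih.cons y).trans (List.Perm.swap x y t)

lemma pvCount_cons (a y : Int) (l : List Int) :
    (a :: l).count y = l.count y + (if y = a then 1 else 0) := by
  rw [List.count_cons]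
  by_cases h : y = a
  · simp [h]
  · simp [h, show ¬ a = y from fun hh => h hh.symm]

lemma pvInsort_count (x y : Int) (l : List Int) :
    (pvInsort x l).count y = l.count y + (if y = x then 1 else 0) := by
  rw [(pvInsort_perm x l).count_eq, pvCount_cons]

lemma pvInsort_sorted (x : Int) {l : List Int} (h : l.Pairwise (· ≤ ·)) :
    (pvInsort x l).Pairwise (· ≤ ·) := by
  induction l with
  | nil => simp [pvInsort]
  | cons y t ih =>
    obtain ⟨hy, ht⟩ := List.pairwise_cons.mp h
    simp only [pvInsort]
    split
    · rename_i hlt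
      refine List.pairwise_cons.mpr ⟨?_, h⟩
      intro b hb
      rcases List.mem_cons.mp hb with rfl | hb
      · exact le_of_lt hlt
      · exact le_trans (le_of_lt hlt) (hy b hb)
    · rename_i hnlt
      refine List.pairwise_cons.mpr ⟨?_, ih ht⟩
      intro b hb
      rcases List.mem_cons.mp ((pvInsort_perm x t).subset hb) with rfl | hb
      · omega
      · exact hy b hb

lemma pvDropStale_none (f : PySem.Dict Int Int) (c : Int → Nat)
    (hf : ∀ y, f.getD y 0 = (c y : Int)) (hz : ∀ y, c y = 0) (l : List Int) :
    pvDropStale f l = none := by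
  induction l with
  | nil => rfl
  | cons x t ih => simp only [pvDropStale, hf x, hz x, Nat.cast_zero, if_pos]; exact ih

lemma pvDropStale_some (f : PySem.Dict Int Int) (c : Int → Nat) (l : List Int)
    (hf : ∀ y, f.getD y 0 = (c y : Int)) (hs : l.Pairwise (· ≤ ·))
    (hc : ∀ y, c y ≤ l.count y) (y0 : Int) (hy0 : c y0 ≠ 0) :
    ∃ h t, pvDropStale f l = some (h :: t) ∧ (h :: t).Pairwise (· ≤ ·) ∧ c h ≠ 0 ∧
      (∀ y, c y ≤ (h :: t).count y) ∧ (∀ y, c y ≠ 0 → h ≤ y) := by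
  induction l with
  | nil => exact absurd (Nat.le_zero.mp (by simpa using hc y0)) hy0
  | cons x t ih =>
    by_cases hx : c x = 0
    · have step : pvDropStale f (x :: t) = pvDropStale f t := by
        simp [pvDropStale, hf x, hx]
      have hc' : ∀ y, c y ≤ t.count y := by
        intro y
        have := hc y
        rw [pvCount_cons] at this
        by_cases hxy : y = x
        · rw [hxy, hx]; exact Nat.zero_le _
        · simpa [hxy] using this
      rw [step]
      exact ih (List.Pairwise.of_cons hs) hc'
    · refine ⟨x, t, ?_, hs, hx, hc, ?_⟩
      · simp [pvDropStale, hf x, hx]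
      · intro y hy
        have hmem : y ∈ x :: t := List.count_pos_iff.mp (lt_of_lt_of_le (Nat.pos_of_ne_zero hy) (hc y))
        rcases List.mem_cons.mp hmem with rfl | hmem
        · exact le_refl _
        · exact (List.pairwise_cons.mp hs).1 y hmem

lemma pvDropStaleNeg_none (f : PySem.Dict Int Int) (c : Int → Nat)
    (hf : ∀ z, f.getD (-z) 0 = (c z : Int)) (hz : ∀ z, c z = 0) (l : List Int) :
    pvDropStaleNeg f l = none := by
  induction l with
  | nil => rfl
  | cons x t ih => simp only [pvDropStaleNeg, hf x, hz x, Nat.cast_zero, if_pos]; exact ih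

lemma pvDropStaleNeg_some (f : PySem.Dict Int Int) (c : Int → Nat) (l : List Int)
    (hf : ∀ z, f.getD (-z) 0 = (c z : Int)) (hs : l.Pairwise (· ≤ ·))
    (hc : ∀ z, c z ≤ l.count z) (z0 : Int) (hz0 : c z0 ≠ 0) :
    ∃ h t, pvDropStaleNeg f l = some (h :: t) ∧ (h :: t).Pairwise (· ≤ ·) ∧ c h ≠ 0 ∧
      (∀ z, c z ≤ (h :: t).count z) ∧ (∀ z, c z ≠ 0 → h ≤ z) := by
  induction l with
  | nil => exact absurd (Nat.le_zero.mp (by simpa using hc z0)) hz0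
  | cons x t ih =>
    by_cases hx : c x = 0
    · have step : pvDropStaleNeg f (x :: t) = pvDropStaleNeg f t := by
        simp [pvDropStaleNeg, hf x, hx]
      have hc' : ∀ z, c z ≤ t.count z := by
        intro z
        have := hc z
        rw [pvCount_cons] at this
        by_cases hxz : z = x
        · rw [hxz, hx]; exact Nat.zero_le _
        · simpa [hxz] using this
      rw [step]
      exact ih (List.Pairwise.of_cons hs) hc'
    · refine ⟨x, t, ?_, hs, hx, hc, ?_⟩
      · simp [pvDropStaleNeg, hf x, hx]
      · intro z hz
        have hmem : z ∈ x :: t := List.count_pos_iff.mp (lt_of_lt_of_le (Nat.pos_of_ne_zero hz) (hc z))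
        rcases List.mem_cons.mp hmem with rfl | hmem
        · exact le_refl _
        · exact (List.pairwise_cons.mp hs).1 z hmem

lemma pvCount_concat (l : List Int) (a y : Int) :
    (l ++ [a]).count y = l.count y + (if y = a then 1 else 0) := by
  rw [List.count_append, pvCount_cons]
  simp

lemma pvCount_dropLast (s : List Int) (h : s ≠ []) (y : Int) :
    s.count y = s.dropLast.count y + (if y = s.getLast h then 1 else 0) := by
  conv_lhs => rw [← List.dropLast_concat_getLast h]
  rw [pvCount_concat]

lemma pvLe_getLast (l : List Int) (h : l.Pairwise (· ≤ ·)) (hne : l ≠ []) (x : Int)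
    (hx : x ∈ l) : x ≤ l.getLast hne := by
  rw [← List.dropLast_concat_getLast hne] at hx h
  rcases List.mem_append.mp hx with h1 | h1
  · exact (List.pairwise_append.mp h).2.2 x h1 (l.getLast hne) (by simp)
  · simp at h1; omega

lemma pvPush_step (x : Int) (mh Mh : List Int) (f : PySem.Dict Int Int) (s : List Int)
    (h : pvInv mh Mh f s) :
    pvInv (pvInsort x mh) (pvInsort (-x) Mh) (f.insert x (f.getD x 0 + 1)) (pvInsort x s) := by
  obtain ⟨h1, h2, h3, h4, h5, h6⟩ := h
  refine ⟨pvInsort_sorted x h1, pvInsort_sorted (-x) h2, pvInsort_sorted x h3, ?_, ?_, ?_⟩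
  · intro y
    rw [PySem.Dict.getD_insert, pvInsort_count]
    by_cases hyx : y = x
    · subst hyx; rw [if_pos rfl, if_pos rfl, h4 y]; push_cast; omega
    · rw [if_neg hyx, if_neg hyx, h4 y]; omega
  · intro y
    rw [pvInsort_count, pvInsort_count]
    have := h5 y
    omega
  · intro y
    rw [pvInsort_count, pvInsort_count]
    have := h6 y
    by_cases hyx : y = x
    · subst hyx; simp; omega
    · rw [if_neg hyx, if_neg (by omega : ¬ -y = -x)]; omega

lemma pvPush_fold (d : List Int) (mh Mh : List Int) (f : PySem.Dict Int Int) (s : List Int)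
    (h : pvInv mh Mh f s) :
    pvInv (d.foldl pvPushA (mh, Mh, f)).1 (d.foldl pvPushA (mh, Mh, f)).2.1
      (d.foldl pvPushA (mh, Mh, f)).2.2 (d.foldl (fun s x => pvInsort x s) s) := by
  induction d generalizing mh Mh f s with
  | nil => exact h
  | cons x d ih =>
    simp only [List.foldl_cons]
    exact ih _ _ _ _ (pvPush_step x mh Mh f s h)

lemma pvFoldInsort_perm (d s : List Int) :
    (d.foldl (fun s x => pvInsort x s) s).Perm (s ++ d) := by
  induction d generalizing s with
  | nil => simp
  | cons x d ih =>
    simp only [List.foldl_cons]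
    exact (ih (pvInsort x s)).trans
      (((pvInsort_perm x s).append_right d).trans List.perm_middle.symm)

lemma pvSort_append (s d : List Int) (hs : s.Pairwise (· ≤ ·)) :
    PySem.List.sorted (s ++ d) (fun x => x) false = d.foldl (fun s x => pvInsort x s) s := by
  refine PySem.List.sorted_id_eq_of_perm_of_pairwise _ _ (pvFoldInsort_perm d s) ?_
  induction d generalizing s with
  | nil => exact hs
  | cons x d ih => exact ih (pvInsort x s) (pvInsort_sorted x hs)

def pvPopOf (s1 : List Int) (M ans : Int) : Option (List Int × Int) :=
  match s1 with
  | [] => none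
  | m :: rest => some (rest, ans + (M - m))

lemma pvMinStep_rel (mh MhT : List Int) (f1 : PySem.Dict Int Int) (M ans : Int) (s1 : List Int)
    (hmh : mh.Pairwise (· ≤ ·)) (hMhT : MhT.Pairwise (· ≤ ·)) (hs1 : s1.Pairwise (· ≤ ·))
    (hf1 : ∀ y, f1.getD y 0 = (s1.count y : Int))
    (hcm : ∀ y, s1.count y ≤ mh.count y)
    (hcM : ∀ y, s1.count y ≤ MhT.count (-y)) :
    pvORel (pvMinStep mh MhT f1 M ans) (pvPopOf s1 M ans) := by
  cases s1 with
  | nil =>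
    have hnone : pvDropStale f1 mh = none :=
      pvDropStale_none f1 (fun _ => 0) (fun y => by simpa using hf1 y) (fun _ => rfl) mh
    simp [pvMinStep, hnone, pvORel, pvPopOf]
  | cons m rest =>
    have hy0 : (m :: rest).count m ≠ 0 := by simp
    obtain ⟨h', mhT, heq, hsort', hlive, hcounts, hmin⟩ :=
      pvDropStale_some f1 (fun y => (m :: rest).count y) mh hf1 hmh hcm m hy0
    have hm : h' = m := by
      have hmem : h' ∈ m :: rest := List.count_pos_iff.mp (Nat.pos_of_ne_zero hlive)
      rcases List.mem_cons.mp hmem with rfl | hmem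
      · rfl
      · exact le_antisymm (hmin m hy0) ((List.pairwise_cons.mp hs1).1 h' hmem)
    subst hm
    simp only [pvMinStep, heq, pvORel, pvPopOf]
    refine ⟨⟨List.Pairwise.of_cons hsort', hMhT, List.Pairwise.of_cons hs1, ?_, ?_, ?_⟩, trivial⟩
    · intro y
      rw [PySem.Dict.getD_insert]
      by_cases hym : y = h'
      · subst hym
        rw [if_pos rfl, hf1 y, pvCount_cons, if_pos rfl]
        push_cast; omega
      · rw [if_neg hym, hf1 y, pvCount_cons, if_neg hym]
        simp
    · intro y
      have := hcounts y
      rw [pvCount_cons, pvCount_cons] at this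
      by_cases hym : y = h'
      · subst hym
        rw [if_pos rfl] at this
        omega
      · simpa [hym] using this
    · intro y
      have h1 := hcM y
      rw [pvCount_cons] at h1
      by_cases hym : y = h'
      · subst hym
        rw [if_pos rfl] at h1
        omega
      · simpa [hym] using h1

lemma pvMaxStep_popB (mh Mh : List Int) (f : PySem.Dict Int Int) (s : List Int) (ans : Int)
    (hinv : pvInv mh Mh f s) :
    pvORel (pvMaxStep (mh, Mh, f) ans) (pvPopB s ans) := by
  obtain ⟨h1, h2, h3, h4, h5, h6⟩ := hinv
  by_cases hne : s = []
  · subst hne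
    have hnone : pvDropStaleNeg f Mh = none :=
      pvDropStaleNeg_none f (fun _ => 0) (fun z => by simpa using h4 (-z)) (fun _ => rfl) Mh
    simp [pvMaxStep, hnone, pvPopB, pvORel]
  · have hMmem : s.getLast hne ∈ s := List.getLast_mem hne
    have hz0' : s.count (s.getLast hne) ≠ 0 :=
      Nat.pos_iff_ne_zero.mp (List.count_pos_iff.mpr hMmem)
    obtain ⟨h, MhT, heq, hsort, hlive, hcounts, hmin⟩ :=
      pvDropStaleNeg_some f (fun z => s.count (-z)) Mh (fun z => h4 (-z)) h2
        (fun z => by simpa using h6 (-z)) (-(s.getLast hne)) (by simpa using hz0')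
    have hhM : h = -(s.getLast hne) := by
      have hmem : -h ∈ s := List.count_pos_iff.mp (Nat.pos_of_ne_zero hlive)
      have hle1 : -h ≤ s.getLast hne := pvLe_getLast s h3 hne (-h) hmem
      have hle2 : h ≤ -(s.getLast hne) := hmin (-(s.getLast hne)) (by simpa using hz0')
      omega
    subst hhM
    have hpop : pvPopB s ans = pvPopOf s.dropLast (s.getLast hne) ans := by
      simp only [pvPopB, List.getLast?_eq_some_getLast hne]
      rfl
    rw [hpop]
    simp only [pvMaxStep, heq, neg_neg]
    apply pvMinStep_rel
    · exact h1
    · exact List.Pairwise.of_cons hsort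
    · exact List.Pairwise.sublist (List.dropLast_sublist s) h3
    · intro y
      rw [PySem.Dict.getD_insert]
      have hcnt := pvCount_dropLast s hne y
      by_cases hyM : y = s.getLast hne
      · rw [if_pos hyM, hyM, h4]
        rw [if_pos hyM] at hcnt
        rw [hyM] at hcnt
        omega
      · rw [if_neg hyM, h4 y]
        rw [if_neg hyM] at hcnt
        omega
    · intro y
      have hcnt := pvCount_dropLast s hne y
      have h5y := h5 y
      by_cases hyM : y = s.getLast hne
      · rw [if_pos hyM] at hcnt; omega
      · rw [if_neg hyM] at hcnt; omega
    · intro y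
      have hcnt := pvCount_dropLast s hne y
      have hc2 := hcounts (-y)
      rw [neg_neg, pvCount_cons] at hc2
      by_cases hyM : y = s.getLast hne
      · rw [if_pos hyM] at hcnt
        rw [if_pos (by omega : (-y : Int) = -s.getLast hne)] at hc2
        omega
      · rw [if_neg hyM] at hcnt
        rw [if_neg (by omega : ¬ (-y : Int) = -s.getLast hne)] at hc2
        omega

lemma pvDay_rel (a : List Int × List Int × PySem.Dict Int Int × Int) (b : List Int × Int)
    (d : List Int) (h : pvInv a.1 a.2.1 a.2.2.1 b.1) (hans : a.2.2.2 = b.2) :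
    pvORel (pvDayA a d) (pvDayB b d) := by
  rw [pvDayA, pvDayB, hans, pvSort_append b.1 d h.2.2.1]
  exact pvMaxStep_popB _ _ _ _ b.2 (pvPush_fold d a.1 a.2.1 a.2.2.1 b.1 h)

lemma pvFold_rel (rs : List (List Int))
    (oa : Option (List Int × List Int × PySem.Dict Int Int × Int))
    (ob : Option (List Int × Int)) (h : pvORel oa ob) :
    pvORel (rs.foldl (fun o d => o.bind (fun st => pvDayA st d)) oa)
      (rs.foldl (fun o d => o.bind (fun st => pvDayB st d)) ob) := by
  induction rs generalizing oa ob with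
  | nil => exact h
  | cons d rs ih =>
    simp only [List.foldl_cons]
    apply ih
    cases oa with
    | none =>
      cases ob with
      | none => simp [pvORel]
      | some b => exact absurd h (by simp [pvORel])
    | some a =>
      cases ob with
      | none => exact absurd h (by simp [pvORel])
      | some b => exact pvDay_rel a b d h.1 h.2

-- ===== VERDICT (by name: the statement is the Claim_ definition above) =====
theorem marketingPromotion_spec : Claim_equal_marketingPromotion := by
  intro receipts _ _
  unfold Spec_marketingPromotion marketingPromotion marketingPromotion_alt
  have h := pvFold_rel receipts (some ([], [], PySem.Dict.empty, 0)) (some ([], 0)) (by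
    constructor
    · refine ⟨List.Pairwise.nil, List.Pairwise.nil, List.Pairwise.nil, ?_, ?_, ?_⟩ <;>
        intro y <;> simp [PySem.Dict.getD_empty]
    · rfl)
  cases ha : receipts.foldl (fun o d => o.bind (fun st => pvDayA st d))
      (some ([], [], PySem.Dict.empty, 0)) with
  | none =>
    cases hb : receipts.foldl (fun o d => o.bind (fun st => pvDayB st d)) (some ([], 0)) with
    | none => rfl
    | some b => rw [ha, hb] at h; exact absurd h (by simp [pvORel])
  | some a =>
    cases hb : receipts.foldl (fun o d => o.bind (fun st => pvDayB st d)) (some ([], 0)) with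
    | none => rw [ha, hb] at h; exact absurd h (by simp [pvORel])
    | some b => rw [ha, hb] at h; exact h.2
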